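-- pv_equiv track=rewrite | github.com/gsokoll/ubx-protocol-schema | src/validation/merge.py | merge_bitfield_bits
-- ===== SOURCE A (Python) =====
-- def merge_bitfield_bits(bits_lists: list[list[dict]]) -> list[dict]:
--     """Merge multiple lists of bitfield bits into a superset.
--
--     Args:
--         bits_lists: List of bit definition lists from different sources
--
--     Returns:
--         Merged list of bits containing all unique bits, sorted by bit_start
--     """
--     # Collect all bits by name, keeping the most complete definition
--     merged = {}  # bit_name -> bit definition
--
--     for bits in bits_lists:
--         for bit in bits:
--             name = bit.get('name', '')
--             if not name:
--                 continue
--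
--             # Skip reserved bits
--             if bit.get('reserved', False) or 'reserved' in name.lower():
--                 continue
--
--             if name not in merged:
--                 merged[name] = bit.copy()
--             else:
--                 # Keep the one with more complete description
--                 existing = merged[name]
--                 if len(bit.get('description', '')) > len(existing.get('description', '')):
--                     merged[name] = bit.copy()
--
--     # Sort by bit_start position
--     result = sorted(merged.values(), key=lambda b: b.get('bit_start', 0))
--     return result
-- ===== SOURCE B (Python) =====
-- def merge_bitfield_bits(bits_lists: list[list[dict]]) -> list[dict]:
--     """Merge multiple lists of bitfield bits into a superset (flatten/filter,
--     dedup names in first-seen order, per-name max by description length)."""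
--     stream = [bit for bits in bits_lists for bit in bits
--               if bit.get('name', '')
--               and not (bit.get('reserved', False)
--                        or 'reserved' in bit.get('name', '').lower())]
--     order = dict.fromkeys(bit['name'] for bit in stream)
--     chosen = [max((bit for bit in stream if bit['name'] == name),
--                   key=lambda b: len(b.get('description', ''))).copy()
--               for name in order]
--     return sorted(chosen, key=lambda b: b.get('bit_start', 0))
-- ===== Notes on version B (the rewrite author's own statement) =====
-- stated objective: alternative
-- what changed: Replaces A's single-pass dict-of-best accumulator with a flatten+filter comprehension, an ordered dedup of the names, and an independent per-name max-by-description-length scan, followed by the same bit_start sort.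
import Mathlib
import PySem

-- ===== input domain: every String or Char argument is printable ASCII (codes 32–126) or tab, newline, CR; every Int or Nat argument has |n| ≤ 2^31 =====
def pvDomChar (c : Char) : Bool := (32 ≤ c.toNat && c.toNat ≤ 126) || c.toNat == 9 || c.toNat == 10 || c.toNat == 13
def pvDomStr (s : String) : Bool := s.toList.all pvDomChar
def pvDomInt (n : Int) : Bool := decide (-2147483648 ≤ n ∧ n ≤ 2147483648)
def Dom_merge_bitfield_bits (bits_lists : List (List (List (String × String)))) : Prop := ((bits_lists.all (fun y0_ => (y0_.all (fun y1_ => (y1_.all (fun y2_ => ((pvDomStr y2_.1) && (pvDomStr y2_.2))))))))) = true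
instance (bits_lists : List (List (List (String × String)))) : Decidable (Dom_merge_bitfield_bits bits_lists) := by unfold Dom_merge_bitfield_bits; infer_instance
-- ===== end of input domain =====

-- B replaces A's single-pass dict-of-best accumulator by flatten/filter once, dedup of
-- names in first-seen order, and an independent per-name max-by-description scan
-- ('alternative' decomposition, same results; no speed claim). Equivalence is about the
-- RETURN value only (A and B both return fresh copies, neither mutates its argument).

-- ===== PORT A =====
-- truthiness of bit.get('reserved', False): a present value (a string here) is truthy iff nonempty
def pvTruthy : Option String → Bool
  | some v => v != ""
  | none => false

def merge_bitfield_bits (bits_lists : List (List (List (String × String)))) : List (List (String × String)) :=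
  let merged : PySem.Dict String (PySem.Dict String String) :=
    bits_lists.foldl (fun merged bits =>
      bits.foldl (fun merged bitL =>
        let bit := PySem.Dict.ofList bitL
        let name := bit.getD "name" ""
        if name == "" then merged
        else if pvTruthy (bit.get? "reserved") || PySem.Str.isIn "reserved" (PySem.Str.lower name) then merged
        else
          match merged.get? name with
          | none => merged.insert name bit
          | some existing =>
            if PySem.Str.len (bit.getD "description" "") > PySem.Str.len (existing.getD "description" "") then
              merged.insert name bit
            else merged) merged) PySem.Dict.empty
  -- under Pre_ every element handed to sorted carries a (string) 'bit_start' or none does,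
  -- so the key getD "bit_start" "" is faithful to Python's b.get('bit_start', 0)
  (PySem.List.sorted merged.values (fun b => b.getD "bit_start" "") false).map PySem.Dict.items

-- ===== PORT B =====
def merge_bitfield_bits_alt (bits_lists : List (List (List (String × String)))) : List (List (String × String)) :=
  let stream : List (PySem.Dict String String) :=
    ((bits_lists.flatten).map PySem.Dict.ofList).filter (fun bit =>
      bit.getD "name" "" != "" &&
      !(pvTruthy (bit.get? "reserved") || PySem.Str.isIn "reserved" (PySem.Str.lower (bit.getD "name" ""))))
  -- bit['name']: the key is present for every bit in stream (the filter demanded a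
  -- nonempty name), so KeyError is unreachable; ported as get? with an unreachable default
  let order := PySem.List.dedup (stream.map (fun bit => (bit.get? "name").getD ""))
  -- max(...) over a per-name group: the group is nonempty because name came from stream,
  -- so Python's ValueError branch (max of empty) is unreachable; .getD covers it
  let chosen := order.map (fun name =>
    (PySem.List.max? (stream.filter (fun bit => (bit.get? "name").getD "" == name))
        (fun b => PySem.Str.len (b.getD "description" ""))).getD PySem.Dict.empty)
  (PySem.List.sorted chosen (fun b => b.getD "bit_start" "") false).map PySem.Dict.items

-- ===== PRECONDITION & SPEC =====
-- pvKept: exactly the bits A's loop keeps (nonempty name, no truthy 'reserved' value, no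
-- 'reserved' substring in the lowercased name)
def pvKept (bitL : List (String × String)) : Bool :=
  let bit : PySem.Dict String String := PySem.Dict.ofList bitL
  bit.getD "name" "" != "" &&
  !(pvTruthy (bit.get? "reserved") || PySem.Str.isIn "reserved" (PySem.Str.lower (bit.getD "name" "")))

-- the kept bits of the input, their first-seen distinct names, and for each name the
-- winning definition (first one of its group with maximal description length) — a
-- declarative characterisation of what ends up in the list handed to sorted
def pvKeptStream (bits_lists : List (List (List (String × String)))) : List (PySem.Dict String String) :=
  (((bits_lists.flatten).filter pvKept).map PySem.Dict.ofList)
def pvWinnerNames (bits_lists : List (List (List (String × String)))) : List String :=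
  PySem.List.dedup ((pvKeptStream bits_lists).map (fun b => b.getD "name" ""))
def pvWinner (bits_lists : List (List (List (String × String)))) (n : String) : PySem.Dict String String :=
  (PySem.List.max? ((pvKeptStream bits_lists).filter (fun b => b.getD "name" "" == n))
      (fun b => PySem.Str.len (b.getD "description" ""))).getD PySem.Dict.empty

-- Pre_ excludes exactly the inputs on which Python RAISES: when the merged per-name
-- winners mix definitions with and without a 'bit_start' key, sorted compares a str key
-- with the int default 0 and both A and B raise TypeError; every input on which A
-- returns a value satisfies Pre_.
def Pre_merge_bitfield_bits (bits_lists : List (List (List (String × String)))) : Prop :=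
  (∀ n ∈ pvWinnerNames bits_lists, (pvWinner bits_lists n).contains "bit_start" = true) ∨
  (∀ n ∈ pvWinnerNames bits_lists, (pvWinner bits_lists n).contains "bit_start" = false)
instance (bits_lists : List (List (List (String × String)))) : Decidable (Pre_merge_bitfield_bits bits_lists) := by unfold Pre_merge_bitfield_bits; infer_instance

def pvWitness_merge_bitfield_bits : (List (List (List (String × String)))) :=
  [[[("name", "x"), ("bit_start", "1"), ("description", "dd")],
    [("name", "y"), ("bit_start", "0")]],
   [[("name", "x"), ("bit_start", "2"), ("description", "d")]]]

def Spec_merge_bitfield_bits (bits_lists : List (List (List (String × String)))) (out : List (List (String × String))) : Prop := out = merge_bitfield_bits_alt bits_lists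
instance (bits_lists : List (List (List (String × String)))) (out : List (List (String × String))) : Decidable (Spec_merge_bitfield_bits bits_lists out) := by unfold Spec_merge_bitfield_bits; infer_instance

-- ===== CLAIM (what is proved, stated in full; the proofs are below) =====
def Claim_equal_merge_bitfield_bits : Prop := ∀ (bits_lists : List (List (List (String × String)))), Dom_merge_bitfield_bits bits_lists → Pre_merge_bitfield_bits bits_lists → Spec_merge_bitfield_bits bits_lists (merge_bitfield_bits bits_lists)

-- ===== LEMMAS AND PROOFS =====
-- abbreviations for the proofs (not used by the ports or by Pre_/Spec_)
def pvNm (b : PySem.Dict String String) : String := b.getD "name" ""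
def pvDlen (b : PySem.Dict String String) : Int := PySem.Str.len (b.getD "description" "")
def pvKeepD (b : PySem.Dict String String) : Bool :=
  b.getD "name" "" != "" &&
  !(pvTruthy (b.get? "reserved") || PySem.Str.isIn "reserved" (PySem.Str.lower (b.getD "name" "")))
def pvStep (d : PySem.Dict String (PySem.Dict String String)) (b : PySem.Dict String String) :
    PySem.Dict String (PySem.Dict String String) :=
  match d.get? (pvNm b) with
  | none => d.insert (pvNm b) b
  | some ex => if PySem.Str.len (b.getD "description" "") > PySem.Str.len (ex.getD "description" "") then
      d.insert (pvNm b) b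
    else d
def pvPick (n : String) (s : List (PySem.Dict String String)) : PySem.Dict String String :=
  (PySem.List.max? (s.filter (fun b => pvNm b == n)) pvDlen).getD PySem.Dict.empty

theorem pvMax?_snoc {α κ : Type} [LT κ] [DecidableLT κ] (xs : List α) (x : α) (key : α → κ) :
    PySem.List.max? (xs ++ [x]) key =
      match PySem.List.max? xs key with
      | none => some x
      | some m => if key m < key x then some x else some m := by
  simp only [PySem.List.max?, List.foldl_append, List.foldl_cons, List.foldl_nil]
  rfl

theorem pvFind?_map_key {α : Type} (ns : List String) (f : String → α) (k : String) :
    ((ns.map (fun n => (n, f n))).find? (fun p => p.1 == k)) =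
      (ns.find? (fun n => n == k)).map (fun n => (n, f n)) := by
  induction ns with
  | nil => rfl
  | cons h t ih =>
    by_cases hk : h = k
    · subst hk; simp [List.find?]
    · have hb : (h == k) = false := by simp [hk]
      simp [List.find?, hb, ih]

theorem pvFind?_beq_self_of_mem (ns : List String) (k : String) (h : k ∈ ns) :
    ns.find? (fun n => n == k) = some k := by
  induction ns with
  | nil => cases h
  | cons a t ih =>
    rcases List.mem_cons.mp h with rfl | hmem
    · simp [List.find?]
    · by_cases ha : a = k
      · subst ha; simp [List.find?]
      · have hb : (a == k) = false := by simp [ha]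
        simp [List.find?, hb, ih hmem]

theorem pvDedup_snoc (l : List String) (x : String) :
    PySem.List.dedup (l ++ [x]) = PySem.Set.add (PySem.List.dedup l) x := by
  simp [PySem.List.dedup, PySem.Set.ofList_eq_foldl, List.foldl_append]

theorem pvPick_snoc_ne (l : List (PySem.Dict String String)) (x : PySem.Dict String String)
    (n : String) (hn : n ≠ pvNm x) : pvPick n (l ++ [x]) = pvPick n l := by
  have hb : (pvNm x == n) = false := by simp [Ne.symm hn]
  simp [pvPick, List.filter_append, hb]

theorem pvPick_snoc_self (l : List (PySem.Dict String String)) (x m : PySem.Dict String String)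
    (hm : PySem.List.max? (l.filter (fun b => pvNm b == pvNm x)) pvDlen = some m) :
    pvPick (pvNm x) (l ++ [x]) = if pvDlen m < pvDlen x then x else m := by
  simp only [pvPick, List.filter_append]
  rw [show List.filter (fun b => pvNm b == pvNm x) [x] = [x] by simp, pvMax?_snoc, hm]
  by_cases hlt : pvDlen m < pvDlen x <;> simp [hlt]

theorem pvPick_snoc_new (l : List (PySem.Dict String String)) (x : PySem.Dict String String)
    (hmem : pvNm x ∉ l.map pvNm) : pvPick (pvNm x) (l ++ [x]) = x := by
  have hnil : l.filter (fun b => pvNm b == pvNm x) = [] := by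
    rw [List.filter_eq_nil_iff]
    intro b hb
    simp only [beq_iff_eq]
    exact fun h => hmem (List.mem_map.mpr ⟨b, hb, h⟩)
  simp [pvPick, List.filter_append, hnil, PySem.List.max?]

-- A's loop over the filtered stream produces, in first-seen name order, for each name
-- the first element of its group with maximal description length
theorem pvFold_items (s : List (PySem.Dict String String)) :
    (s.foldl pvStep PySem.Dict.empty).items =
      (PySem.List.dedup (s.map pvNm)).map (fun n => (n, pvPick n s)) := by
  induction s using List.reverseRecOn with
  | nil => rfl
  | append_singleton l x ih =>
    rw [List.foldl_append, List.map_append]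
    simp only [List.map_cons, List.map_nil, List.foldl_cons, List.foldl_nil]
    rw [pvDedup_snoc]
    by_cases hmem : pvNm x ∈ l.map pvNm
    · -- name already present
      have hmD : pvNm x ∈ PySem.List.dedup (l.map pvNm) := by
        simpa [PySem.List.dedup, PySem.Set.mem_ofList] using hmem
      have hget : (l.foldl pvStep PySem.Dict.empty).get? (pvNm x) = some (pvPick (pvNm x) l) := by
        simp only [PySem.Dict.get?, ih]
        rw [pvFind?_map_key, pvFind?_beq_self_of_mem _ _ hmD]
        rfl
      have hadd : PySem.Set.add (PySem.List.dedup (l.map pvNm)) (pvNm x) =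
          PySem.List.dedup (l.map pvNm) := by
        simp [PySem.Set.add]
        rcases List.mem_map.mp hmem with ⟨b, hb, hbn⟩
        exact ⟨b, hb, hbn⟩
      have hgrp : l.filter (fun b => pvNm b == pvNm x) ≠ [] := by
        intro hnil
        rcases List.mem_map.mp hmem with ⟨b, hb, hbn⟩
        exact (List.filter_eq_nil_iff.mp hnil b hb) (by simp [hbn])
      obtain ⟨m, hm⟩ : ∃ m, PySem.List.max? (l.filter (fun b => pvNm b == pvNm x)) pvDlen = some m := by
        cases hmx : PySem.List.max? (l.filter (fun b => pvNm b == pvNm x)) pvDlen with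
        | none => exact absurd ((PySem.List.max?_eq_none_iff _ _).mp hmx) hgrp
        | some m => exact ⟨m, rfl⟩
      have hpickm : pvPick (pvNm x) l = m := by simp [pvPick, hm]
      rw [hadd]
      by_cases hlt : pvDlen m < pvDlen x
      · -- replacement: insert on a present key rewrites the value in place
        have hcont : (l.foldl pvStep PySem.Dict.empty).contains (pvNm x) = true := by
          simp only [PySem.Dict.contains, ih, List.any_eq_true]
          exact ⟨(pvNm x, pvPick (pvNm x) l), List.mem_map.mpr ⟨pvNm x, hmD, rfl⟩, by simp⟩
        have hstep : pvStep (l.foldl pvStep PySem.Dict.empty) x =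
            (l.foldl pvStep PySem.Dict.empty).insert (pvNm x) x := by
          simp only [pvStep, hget, hpickm]
          exact if_pos (by simpa [pvDlen] using hlt)
        rw [hstep]
        simp only [PySem.Dict.insert, hcont, if_true]
        rw [ih, List.map_map]
        apply List.map_congr_left
        intro n hn
        by_cases hne : n = pvNm x
        · subst hne
          rw [pvPick_snoc_self l x m hm, if_pos hlt]
          simp [Function.comp]
        · have hb : (n == pvNm x) = false := by simp [hne]
          rw [pvPick_snoc_ne l x n hne]
          simp [Function.comp, hb]
      · -- keep the existing entry
        have hstep : pvStep (l.foldl pvStep PySem.Dict.empty) x =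
            l.foldl pvStep PySem.Dict.empty := by
          simp only [pvStep, hget, hpickm]
          exact if_neg (by simpa [pvDlen] using hlt)
        rw [hstep, ih]
        apply List.map_congr_left
        intro n hn
        by_cases hne : n = pvNm x
        · subst hne
          rw [pvPick_snoc_self l x m hm, if_neg hlt, hpickm]
        · rw [pvPick_snoc_ne l x n hne]
    · -- new name: appended at the end
      have hnmem : pvNm x ∉ PySem.List.dedup (l.map pvNm) := by
        intro h; exact hmem (by simpa [PySem.List.dedup, PySem.Set.mem_ofList] using h)
      have hget : (l.foldl pvStep PySem.Dict.empty).get? (pvNm x) = none := by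
        simp only [PySem.Dict.get?, ih]
        rw [pvFind?_map_key]
        rw [List.find?_eq_none.mpr (fun n hn => by
          simp only [beq_iff_eq]
          exact fun hEq => hnmem (hEq ▸ hn))]
        rfl
      have hcont : (l.foldl pvStep PySem.Dict.empty).contains (pvNm x) = false := by
        simp only [PySem.Dict.contains, ih]
        rw [List.any_eq_false]
        rintro ⟨n, pk⟩ hp
        rcases List.mem_map.mp hp with ⟨n', hn', heq⟩
        cases heq
        simp only [beq_iff_eq]
        exact fun hEq => hnmem (hEq ▸ hn')
      have hadd : PySem.Set.add (PySem.List.dedup (l.map pvNm)) (pvNm x) =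
          PySem.List.dedup (l.map pvNm) ++ [pvNm x] := by
        simp [PySem.Set.add]
        intro b hb hEq
        exact hmem (List.mem_map.mpr ⟨b, hb, hEq⟩)
      rw [hadd, List.map_append]
      have hstep : pvStep (l.foldl pvStep PySem.Dict.empty) x =
          (l.foldl pvStep PySem.Dict.empty).insert (pvNm x) x := by
        simp [pvStep, hget]
      rw [hstep]
      simp only [PySem.Dict.insert, hcont, Bool.false_eq_true, if_false]
      rw [ih]
      congr 1
      · apply List.map_congr_left
        intro n hn
        have hnl : n ∈ l.map pvNm := by
          simpa [PySem.List.dedup, PySem.Set.mem_ofList] using hn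
        rw [pvPick_snoc_ne l x n (fun h => hmem (h ▸ hnl))]
      · simp [pvPick_snoc_new l x hmem]

-- A's nested loop over bits_lists equals the filtered-stream fold
theorem pvA_eq_stream_fold (bits_lists : List (List (List (String × String)))) :
    (bits_lists.foldl (fun merged bits =>
      bits.foldl (fun merged bitL =>
        let bit : PySem.Dict String String := PySem.Dict.ofList bitL
        let name := bit.getD "name" ""
        if name == "" then merged
        else if pvTruthy (bit.get? "reserved") || PySem.Str.isIn "reserved" (PySem.Str.lower name) then merged
        else
          match merged.get? name with
          | none => merged.insert name bit
          | some existing =>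
            if PySem.Str.len (bit.getD "description" "") > PySem.Str.len (existing.getD "description" "") then
              merged.insert name bit
            else merged) merged) (PySem.Dict.empty : PySem.Dict String (PySem.Dict String String))) =
    (((bits_lists.flatten).map PySem.Dict.ofList).filter pvKeepD).foldl pvStep PySem.Dict.empty := by
  symm
  rw [← PySem.List.foldl_if_eq_foldl_filter pvKeepD pvStep, List.foldl_map, List.foldl_flatten]
  apply PySem.List.foldl_congr_mem
  intro acc bits _
  apply PySem.List.foldl_congr_mem
  intro acc2 b _
  simp only [pvKeepD, pvStep, pvNm]
  by_cases h1 : (PySem.Dict.ofList b : PySem.Dict String String).getD "name" "" == ""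
  · simp_all
  · by_cases h2 : pvTruthy ((PySem.Dict.ofList b : PySem.Dict String String).get? "reserved") || PySem.Str.isIn "reserved" (PySem.Str.lower ((PySem.Dict.ofList b : PySem.Dict String String).getD "name" ""))
    all_goals simp_all
    all_goals (intro hT hI; rcases h2 with h2 | h2 <;> simp_all)

-- ===== VERDICT (by name: the statement is the Claim_ definition above) =====
theorem merge_bitfield_bits_spec : Claim_equal_merge_bitfield_bits := by
  intro bits_lists _ _
  unfold Spec_merge_bitfield_bits merge_bitfield_bits merge_bitfield_bits_alt
  rw [pvA_eq_stream_fold]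
  simp only [PySem.Dict.values, pvFold_items, List.map_map]
  rfl
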